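-- pv_equiv track=rewrite | github.com/miguelsantos42/FPRO | FPRO22_23/Testes/Teste modelos/Teste Modelo 2 resolução/ex2.py | is_pair_of_square
-- ===== SOURCE A (Python) =====
-- def is_pair_of_square(number_one, number_two):
--     square_one = number_one * number_one
--     square_two = number_two * number_two
--
--     if number_one == number_two:
--         return False
--
--     aux = square_two
--     final_reverse_two = 0
--     while aux != 0:
--         d = aux % 10
--         final_reverse_two = final_reverse_two * 10 + d
--         aux = aux // 10
--
--     if square_one == final_reverse_two:
--         return True
--     else:
--         return False
-- ===== SOURCE B (Python) =====
-- def is_pair_of_square(number_one, number_two):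
--     if number_one == number_two:
--         return False
--     square_one = number_one * number_one
--     square_two = number_two * number_two
--     return square_one == int(str(square_two)[::-1])
-- ===== Notes on version B (the rewrite author's own statement) =====
-- stated objective: idiomatic
-- what changed: Replaces the arithmetic while-loop digit reversal (mod/div accumulation) with the idiomatic string-slice reversal int(str(square_two)[::-1]).
import Mathlib
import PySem

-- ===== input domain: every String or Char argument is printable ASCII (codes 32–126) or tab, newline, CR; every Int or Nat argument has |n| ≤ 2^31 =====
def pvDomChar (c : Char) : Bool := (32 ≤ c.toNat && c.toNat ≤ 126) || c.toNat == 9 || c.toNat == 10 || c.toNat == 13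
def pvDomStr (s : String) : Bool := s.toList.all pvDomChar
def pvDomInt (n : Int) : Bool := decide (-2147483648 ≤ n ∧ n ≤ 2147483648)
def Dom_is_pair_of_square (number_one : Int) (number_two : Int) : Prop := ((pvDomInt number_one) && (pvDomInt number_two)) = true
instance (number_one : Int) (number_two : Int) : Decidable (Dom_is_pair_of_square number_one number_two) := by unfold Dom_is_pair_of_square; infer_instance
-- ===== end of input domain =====

-- B replaces A's arithmetic while-loop digit reversal with the idiomatic
-- string-slice reversal int(str(square_two)[::-1]); same results, same cost.


-- ===== PORT A =====
-- A's while-loop `while aux != 0: d = aux % 10; acc = acc*10 + d; aux = aux // 10`.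
-- aux is always a square, hence nonnegative: the guard is written `0 < aux`, which
-- coincides with Python's `aux != 0` on every value the loop ever sees (on a negative
-- aux Python's loop would not terminate, which is unreachable here).
def pvRevLoop (aux : Int) (acc : Int) : Int :=
  if h : 0 < aux then
    pvRevLoop (PySem.Int.floordiv aux 10) (acc * 10 + PySem.Int.mod aux 10)
  else acc
termination_by aux.toNat
decreasing_by
  rw [PySem.Int.floordiv_eq_ediv_of_pos (by norm_num)]
  omega

def is_pair_of_square (number_one : Int) (number_two : Int) : Bool :=
  let square_one := number_one * number_one
  let square_two := number_two * number_two
  if number_one = number_two then false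
  else
    let final_reverse_two := pvRevLoop square_two 0
    if square_one = final_reverse_two then true else false

-- ===== PORT B =====
-- Python's int(cs) ported by hand as a left fold over the digit characters; exact on
-- all-digit strings, which str(square_two)[::-1] always is (square_two ≥ 0).
def pvParseDigits (cs : List Char) : Int :=
  cs.foldl (fun a c => a * 10 + ((c.toNat : Int) - 48)) 0

def is_pair_of_square_alt (number_one : Int) (number_two : Int) : Bool :=
  if number_one = number_two then false
  else
    let square_one := number_one * number_one
    let square_two := number_two * number_two
    -- str(square_two)[::-1]: List.reverse is the [::-1] slice on the character list
    decide (square_one = pvParseDigits ((PySem.Int.toChars square_two).reverse))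

-- ===== PRECONDITION & SPEC =====
def Spec_is_pair_of_square (number_one : Int) (number_two : Int) (out : Bool) : Prop := out = is_pair_of_square_alt number_one number_two
instance (number_one : Int) (number_two : Int) (out : Bool) : Decidable (Spec_is_pair_of_square number_one number_two out) := by unfold Spec_is_pair_of_square; infer_instance

-- ===== CLAIM (what is proved, stated in full; the proofs are below) =====
def Claim_equal_is_pair_of_square : Prop := ∀ (number_one : Int) (number_two : Int), Dom_is_pair_of_square number_one number_two → Spec_is_pair_of_square number_one number_two (is_pair_of_square number_one number_two)

-- ===== LEMMAS AND PROOFS =====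

-- `Nat.toDigitsCore` only prepends to its accumulator.
theorem pv_toDigitsCore_append (f : Nat) : ∀ (n : Nat) (ds : List Char),
    Nat.toDigitsCore 10 f n ds = Nat.toDigitsCore 10 f n [] ++ ds := by
  induction f with
  | zero => intro n ds; simp [Nat.toDigitsCore]
  | succ f ih =>
    intro n ds
    simp only [Nat.toDigitsCore]
    by_cases h : n / 10 = 0
    · simp [h]
    · simp only [h, if_false]
      rw [ih (n / 10) (Nat.digitChar (n % 10) :: ds),
          ih (n / 10) [Nat.digitChar (n % 10)]]
      simp

-- Fuel irrelevance for `Nat.toDigitsCore` with enough fuel.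
theorem pv_toDigitsCore_fuel (n : Nat) : ∀ (f : Nat) (ds : List Char), n < f →
    Nat.toDigitsCore 10 f n ds = Nat.toDigitsCore 10 (n + 1) n ds := by
  induction n using Nat.strong_induction_on with
  | _ n ih =>
    intro f ds hf
    match f, hf with
    | f + 1, _ =>
      simp only [Nat.toDigitsCore]
      by_cases h : n / 10 = 0
      · simp [h]
      · simp only [h, if_false]
        have hlt : n / 10 < n := Nat.div_lt_self (Nat.pos_of_ne_zero (by omega)) (by norm_num)
        rw [ih (n / 10) hlt f _ (by omega), ih (n / 10) hlt n _ (by omega)]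

theorem pv_toDigits_small {n : Nat} (h : n < 10) :
    Nat.toDigits 10 n = [Nat.digitChar n] := by
  have h10 : n / 10 = 0 := Nat.div_eq_of_lt h
  have hm : n % 10 = n := Nat.mod_eq_of_lt h
  simp [Nat.toDigits, Nat.toDigitsCore, h10, hm]

theorem pv_toDigits_step {n : Nat} (h : 10 ≤ n) :
    Nat.toDigits 10 n = Nat.toDigits 10 (n / 10) ++ [Nat.digitChar (n % 10)] := by
  have h10 : n / 10 ≠ 0 := by
    have := Nat.div_le_div_right (c := 10) h; omega
  have hlt : n / 10 < n := Nat.div_lt_self (by omega) (by norm_num)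
  have e1 : Nat.toDigitsCore 10 (n + 1) n []
      = Nat.toDigitsCore 10 n (n / 10) [Nat.digitChar (n % 10)] := by
    conv_lhs => rw [Nat.toDigitsCore]
    simp [h10]
  rw [Nat.toDigits, e1, pv_toDigitsCore_fuel (n / 10) n _ hlt,
      pv_toDigitsCore_append, Nat.toDigits]

theorem pv_digitChar_val {d : Nat} (h : d < 10) :
    ((Nat.digitChar d).toNat : Int) - 48 = (d : Int) := by
  interval_cases d <;> decide

-- The string-side fold over the reversed digit string computes exactly A's loop.
theorem pv_fold_eq_revLoop (n : Nat) (hn : 0 < n) : ∀ (acc : Int),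
    ((Nat.toDigits 10 n).reverse).foldl (fun a c => a * 10 + ((c.toNat : Int) - 48)) acc
      = pvRevLoop (n : Int) acc := by
  induction n using Nat.strong_induction_on with
  | _ n ih =>
    intro acc
    rw [pvRevLoop]
    have hpos : (0 : Int) < (n : Int) := by exact_mod_cast hn
    rw [dif_pos hpos]
    have hfd : PySem.Int.floordiv (n : Int) 10 = ((n / 10 : Nat) : Int) := by
      exact_mod_cast PySem.Int.floordiv_natCast n 10
    have hmd : PySem.Int.mod (n : Int) 10 = ((n % 10 : Nat) : Int) := by
      exact_mod_cast PySem.Int.mod_natCast n 10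
    rw [hfd, hmd]
    by_cases h : n < 10
    · rw [pv_toDigits_small h]
      have h10 : n / 10 = 0 := Nat.div_eq_of_lt h
      have hm : n % 10 = n := Nat.mod_eq_of_lt h
      rw [h10, hm]
      simp only [List.reverse_singleton, List.foldl_cons, List.foldl_nil,
        pv_digitChar_val h]
      rw [pvRevLoop]
      simp
    · rw [not_lt] at h
      rw [pv_toDigits_step h]
      simp only [List.reverse_append, List.reverse_singleton, List.singleton_append,
        List.foldl_cons]
      rw [pv_digitChar_val (Nat.mod_lt n (by norm_num))]
      exact ih (n / 10) (Nat.div_lt_self hn (by norm_num)) (by omega)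
        (acc * 10 + (n % 10 : Nat))

theorem pv_revLoop_eq_parse (m : Int) (hm : 0 ≤ m) :
    pvRevLoop m 0 = pvParseDigits ((PySem.Int.toChars m).reverse) := by
  obtain ⟨n, rfl⟩ := Int.eq_ofNat_of_zero_le hm
  have htc : PySem.Int.toChars (n : Int) = Nat.toDigits 10 n := by
    simp [PySem.Int.toChars]
  rw [htc]
  by_cases hn : 0 < n
  · exact (pv_fold_eq_revLoop n hn 0).symm
  · have : n = 0 := by omega
    subst this
    rw [pvRevLoop]
    simp [pvParseDigits, Nat.toDigits, Nat.toDigitsCore]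
    decide

-- ===== VERDICT (by name: the statement is the Claim_ definition above) =====
theorem is_pair_of_square_spec : Claim_equal_is_pair_of_square := by
  intro number_one number_two _
  unfold Spec_is_pair_of_square is_pair_of_square is_pair_of_square_alt
  by_cases heq : number_one = number_two
  · simp [heq]
  · simp only [heq, if_false]
    rw [pv_revLoop_eq_parse (number_two * number_two) (mul_self_nonneg _)]
    by_cases hv : number_one * number_one
        = pvParseDigits ((PySem.Int.toChars (number_two * number_two)).reverse)
    · simp [hv]
    · simp [hv]
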